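-- pv_equiv track=rewrite | github.com/Grey-z/FairRec | utilis.py | get_rule_list
-- ===== SOURCE A (Python) =====
-- def get_rule_list(data, cur_y_idx = 0, lst_rst = [], lst_tmp = []):
--     """
--     Get the combination of all sensitive attributes.
--
--     Args:
--     data: list, the range of all sensitive attributes. e.g.[range(2),range(9)].
--     cur_y_idx: int, 0.
--     lst_rst: list, an empty list.
--     lst_tmp: list, an empty list.
--
--     Return
--     lst_rst, the combination of all sensitive attributes. e.g. [[0,0],[0,1],..., [1,8]].
--     """
--     max_y_idx = len(data) - 1
--     for x_idx in range(len(data[cur_y_idx])):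
--         lst_tmp.append(data[cur_y_idx][x_idx])
--         if cur_y_idx == max_y_idx:
--             lst_rst.append([*lst_tmp])
--         else:
--             get_rule_list(data, cur_y_idx+1, lst_rst, lst_tmp)
--         lst_tmp.pop()
--     return lst_rst
-- ===== SOURCE B (Python) =====
-- def get_rule_list(data, cur_y_idx=0, lst_rst=[], lst_tmp=[]):
--     results = [list(lst_tmp)]
--     for i in range(cur_y_idx, len(data)):
--         results = [p + [v] for p in results for v in data[i]]
--     lst_rst.extend(results)
--     return lst_rst
-- ===== Notes on version B (the rewrite author's own statement) =====
-- stated objective: simpler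
-- what changed: Replaced the recursive append/pop DFS with an iterative product accumulator: start from [list(lst_tmp)] and, for each attribute position, extend every partial tuple with each value of that row, then extend lst_rst once.
import Mathlib
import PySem

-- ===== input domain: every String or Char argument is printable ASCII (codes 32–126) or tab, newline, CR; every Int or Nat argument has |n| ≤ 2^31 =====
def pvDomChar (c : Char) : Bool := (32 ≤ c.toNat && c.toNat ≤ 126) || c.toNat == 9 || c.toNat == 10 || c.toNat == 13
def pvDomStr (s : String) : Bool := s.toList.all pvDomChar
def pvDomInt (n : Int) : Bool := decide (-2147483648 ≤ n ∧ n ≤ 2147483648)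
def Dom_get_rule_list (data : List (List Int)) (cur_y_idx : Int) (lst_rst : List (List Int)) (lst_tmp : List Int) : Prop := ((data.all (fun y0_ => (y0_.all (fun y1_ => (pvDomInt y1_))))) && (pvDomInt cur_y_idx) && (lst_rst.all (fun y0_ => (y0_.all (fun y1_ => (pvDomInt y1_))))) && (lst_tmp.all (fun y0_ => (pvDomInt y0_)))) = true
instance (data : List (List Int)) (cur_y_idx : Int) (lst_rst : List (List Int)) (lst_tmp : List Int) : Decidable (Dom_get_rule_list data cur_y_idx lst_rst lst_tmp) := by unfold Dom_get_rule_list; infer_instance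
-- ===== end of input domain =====

-- B replaces A's recursive append/pop DFS by an iterative product accumulator over the attribute
-- positions (objective: simpler). Equivalence is about the RETURN value; both Pythons extend lst_rst
-- in place and leave lst_tmp unchanged on return.

-- ===== PORT A =====
-- A's recursion is ported with a fuel parameter that only makes the computation total (fuel is
-- always sufficient on inputs where Python returns); 'for x_idx in range(len(data[cur_y_idx]))'
-- indexing data[cur_y_idx][x_idx] is the left-to-right traversal of the row, ported as a foldl
-- over the row; lst_tmp.append(v) … lst_tmp.pop() restores lst_tmp, so the loop body sees the
-- fixed lst_tmp with v appended.
def grlFuel (fuel : Nat) (data : List (List Int)) (cur_y_idx : Int) (lst_rst : List (List Int)) (lst_tmp : List Int) : List (List Int) :=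
  match fuel with
  | 0 => lst_rst
  | f + 1 =>
    let max_y_idx : Int := (data.length : Int) - 1
    match PySem.List.pyGet? data cur_y_idx with
    | none => lst_rst   -- Python raises IndexError here; excluded by Pre_get_rule_list
    | some row =>
      row.foldl (fun rst v =>
        if cur_y_idx = max_y_idx then rst ++ [lst_tmp ++ [v]]
        else grlFuel f data (cur_y_idx + 1) rst (lst_tmp ++ [v])) lst_rst

def get_rule_list (data : List (List Int)) (cur_y_idx : Int) (lst_rst : List (List Int)) (lst_tmp : List Int) : List (List Int) :=
  grlFuel (data.length + cur_y_idx.natAbs + 1) data cur_y_idx lst_rst lst_tmp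

-- ===== PORT B =====
-- Source B: results = [list(lst_tmp)]; for i in range(cur_y_idx, len(data)): results = [p+[v] for p in
-- results for v in data[i]]; lst_rst.extend(results); return lst_rst.  data[i] is ported as
-- pyGetD data i []: inside Pre_ every i in the range satisfies -len(data) ≤ i < len(data), so the
-- default is never reached and pyGetD agrees with Python's data[i].
def get_rule_list_alt (data : List (List Int)) (cur_y_idx : Int) (lst_rst : List (List Int)) (lst_tmp : List Int) : List (List Int) :=
  let results :=
    (PySem.List.pyRange cur_y_idx (data.length : Int) 1).foldl
      (fun results i =>
        results.flatMap (fun p => (PySem.List.pyGetD data i []).map (fun v => p ++ [v])))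
      [lst_tmp]
  lst_rst ++ results

-- ===== PRECONDITION & SPEC =====
-- Pre_ excludes exactly the inputs where Python A raises IndexError: cur_y_idx outside the
-- negative-to-positive index range of data (in particular data = []).
def Pre_get_rule_list (data : List (List Int)) (cur_y_idx : Int) (lst_rst : List (List Int)) (lst_tmp : List Int) : Prop :=
  -(data.length : Int) ≤ cur_y_idx ∧ cur_y_idx < (data.length : Int)
instance (data : List (List Int)) (cur_y_idx : Int) (lst_rst : List (List Int)) (lst_tmp : List Int) : Decidable (Pre_get_rule_list data cur_y_idx lst_rst lst_tmp) := by unfold Pre_get_rule_list; infer_instance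
def pvWitness_get_rule_list : List (List Int) × Int × List (List Int) × List Int := ([[0, 1], [2, 3]], 0, [], [])

def Spec_get_rule_list (data : List (List Int)) (cur_y_idx : Int) (lst_rst : List (List Int)) (lst_tmp : List Int) (out : List (List Int)) : Prop := out = get_rule_list_alt data cur_y_idx lst_rst lst_tmp
instance (data : List (List Int)) (cur_y_idx : Int) (lst_rst : List (List Int)) (lst_tmp : List Int) (out : List (List Int)) : Decidable (Spec_get_rule_list data cur_y_idx lst_rst lst_tmp out) := by unfold Spec_get_rule_list; infer_instance

-- ===== CLAIM (what is proved, stated in full; the proofs are below) =====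
def Claim_equal_get_rule_list : Prop := ∀ (data : List (List Int)) (cur_y_idx : Int) (lst_rst : List (List Int)) (lst_tmp : List Int), Dom_get_rule_list data cur_y_idx lst_rst lst_tmp → Pre_get_rule_list data cur_y_idx lst_rst lst_tmp → Spec_get_rule_list data cur_y_idx lst_rst lst_tmp (get_rule_list data cur_y_idx lst_rst lst_tmp)

-- ===== LEMMAS AND PROOFS =====

-- B's loop step, named for the proofs (definitionally the lambda in get_rule_list_alt).
def bStep (data : List (List Int)) : List (List Int) → Int → List (List Int) :=
  fun results i => results.flatMap (fun p => (PySem.List.pyGetD data i []).map (fun v => p ++ [v]))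

-- B's fold distributes over its starting list of partial tuples.
theorem bfold_flatMap (data : List (List Int)) (rs : List Int) :
    ∀ (L : List (List Int)), rs.foldl (bStep data) L = L.flatMap (fun p => rs.foldl (bStep data) [p]) := by
  induction rs with
  | nil => intro L; simp
  | cons r rs ih =>
    intro L
    simp only [List.foldl_cons]
    rw [ih (bStep data L r)]
    have h2 : ∀ p : List Int, rs.foldl (bStep data) (bStep data [p] r)
        = (bStep data [p] r).flatMap (fun q => rs.foldl (bStep data) [q]) := fun p => ih _
    simp only [h2]
    simp [bStep, List.flatMap_assoc]

theorem grlFuel_eq (data : List (List Int)) :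
    ∀ (f : Nat) (c : Int) (rst : List (List Int)) (tmp : List Int),
      -(data.length : Int) ≤ c → c < (data.length : Int) → (data.length : Int) - c ≤ (f : Int) →
      grlFuel f data c rst tmp =
        rst ++ (PySem.List.pyRange c (data.length : Int) 1).foldl (bStep data) [tmp] := by
  intro f
  induction f with
  | zero => intro c rst tmp h1 h2 hf; exfalso; omega
  | succ f ih =>
    intro c rst tmp h1 h2 hf
    have hsome : ∃ row, PySem.List.pyGet? data c = some row := by
      rcases h : PySem.List.pyGet? data c with _ | row
      · rw [PySem.List.pyGet?_eq_none_iff] at h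
        exact absurd ⟨h1, h2⟩ h
      · exact ⟨row, rfl⟩
    rcases hsome with ⟨row, hrow⟩
    have hrowD : PySem.List.pyGetD data c [] = row := by
      simp [PySem.List.pyGetD, hrow]
    have hcons : PySem.List.pyRange c (data.length : Int) 1
        = c :: PySem.List.pyRange (c + 1) (data.length : Int) 1 :=
      PySem.List.pyRange_one_cons h2
    by_cases hlast : c = (data.length : Int) - 1
    · -- innermost attribute: append completed tuples
      simp only [grlFuel, hrow, if_pos hlast]
      rw [PySem.List.foldl_append_singleton_eq_map]
      rw [hcons]
      have : PySem.List.pyRange (c + 1) (data.length : Int) 1 = [] :=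
        PySem.List.pyRange_one_eq_nil (by omega)
      simp [this, bStep, hrowD]
    · -- recurse into the next attribute position
      simp only [grlFuel, hrow, if_neg hlast]
      have hstep : (fun (rst : List (List Int)) (v : Int) =>
            grlFuel f data (c + 1) rst (tmp ++ [v]))
          = fun rst v => rst ++ (PySem.List.pyRange (c + 1) (data.length : Int) 1).foldl (bStep data) [tmp ++ [v]] := by
        funext rst v
        exact ih (c + 1) rst (tmp ++ [v]) (by omega) (by omega) (by push_cast at hf ⊢; omega)
      rw [hstep, PySem.List.foldl_append_eq_flatMap]
      rw [hcons]
      simp only [List.foldl_cons]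
      have hfirst : bStep data [tmp] c = row.map (fun v => tmp ++ [v]) := by
        simp [bStep, hrowD]
      rw [hfirst, bfold_flatMap]
      simp [List.flatMap_map]

-- ===== VERDICT (by name: the statement is the Claim_ definition above) =====
theorem get_rule_list_spec : Claim_equal_get_rule_list := by
  intro data c rst tmp _hdom hpre
  unfold Spec_get_rule_list get_rule_list get_rule_list_alt
  rcases hpre with ⟨h1, h2⟩
  rw [grlFuel_eq data (data.length + c.natAbs + 1) c rst tmp h1 h2 (by simp only [Nat.cast_add, Nat.cast_one]; omega)]
  rfl
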